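-- pv_equiv track=rewrite | github.com/KonstantinData/SQL-Data-Warehouse | src/sql_jobs/_runtime.py | extract_expectations
-- ===== SOURCE A (Python) =====
-- def extract_expectations(sql: str) -> list[tuple[str, bool]]:
--     statements = []
--     buffer = []
--     expect_no_rows = False
--     for line in sql.splitlines():
--         stripped = line.strip()
--         if stripped.startswith("--") and "Expectation:" in stripped:
--             expect_no_rows = "No Results" in stripped or "No Invalid" in stripped or "No NULL" in stripped
--         buffer.append(line)
--         if stripped.endswith(";"):
--             statement = "\n".join(buffer)
--             cleaned = statement.strip()
--             if cleaned:
--                 statements.append((cleaned.rstrip(";"), expect_no_rows))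
--             buffer = []
--             expect_no_rows = False
--     if buffer:
--         cleaned = "\n".join(buffer).strip()
--         if cleaned:
--             statements.append((cleaned, expect_no_rows))
--     return statements
-- ===== SOURCE B (Python) =====
-- def _chunk_flag(chunk):
--     for line in reversed(chunk):
--         s = line.strip()
--         if s.startswith("--") and "Expectation:" in s:
--             return "No Results" in s or "No Invalid" in s or "No NULL" in s
--     return False
--
--
-- def extract_expectations(sql: str) -> list[tuple[str, bool]]:
--     # pass 1: cut the lines into chunks at lines whose stripped form ends with ';'
--     chunks = []
--     cur = []
--     for line in sql.splitlines():
--         cur.append(line)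
--         if line.strip().endswith(";"):
--             chunks.append(cur)
--             cur = []
--     # pass 2: per flushed chunk, emit cleaned text and the last expectation flag
--     out = []
--     for chunk in chunks:
--         cleaned = "\n".join(chunk).strip()
--         if cleaned:
--             out.append((cleaned.rstrip(";"), _chunk_flag(chunk)))
--     tail = "\n".join(cur).strip()
--     if tail:
--         out.append((tail, _chunk_flag(cur)))
--     return out
-- ===== Notes on version B (the rewrite author's own statement) =====
-- stated objective: alternative
-- what changed: Replaces A's single stateful loop (running statement/buffer/flag state with in-loop flushes and a trailing buffer block) by two passes: first cut the lines into chunks at semicolon-terminated lines, then derive each statement and its expectation flag from its chunk alone, with the flag found by a backward scan for the last expectation comment.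
import Mathlib
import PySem

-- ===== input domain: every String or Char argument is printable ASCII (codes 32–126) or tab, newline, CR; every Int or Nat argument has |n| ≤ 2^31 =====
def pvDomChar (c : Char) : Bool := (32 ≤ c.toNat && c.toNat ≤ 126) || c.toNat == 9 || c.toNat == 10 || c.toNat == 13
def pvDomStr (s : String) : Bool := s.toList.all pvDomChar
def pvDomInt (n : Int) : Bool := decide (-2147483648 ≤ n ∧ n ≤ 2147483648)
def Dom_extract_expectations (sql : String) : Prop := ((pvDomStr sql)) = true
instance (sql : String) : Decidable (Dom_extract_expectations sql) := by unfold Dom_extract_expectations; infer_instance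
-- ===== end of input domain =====

-- B re-decomposes A's single stateful loop into two passes — chunking at semicolon-terminated
-- lines, then a per-chunk backward scan for the last expectation comment (objective: alternative).

-- shared tiny predicates on a stripped line (both Pythons test the same literals)
def eeIsExp (s : String) : Bool :=
  PySem.Str.startswith s "--" && PySem.Str.isIn "Expectation:" s

def eeVal (s : String) : Bool :=
  PySem.Str.isIn "No Results" s || PySem.Str.isIn "No Invalid" s || PySem.Str.isIn "No NULL" s

-- hand port of Python's s.rstrip(";") (single strip char): drop trailing ';' — exact
def eeRstripSemi (s : String) : String :=
  String.ofList ((s.toList.reverse.dropWhile (· == ';')).reverse)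

-- ===== PORT A =====
-- loop body of A: state = (statements, buffer, expect_no_rows)
def eeStepA (st : List (String × Bool) × List String × Bool) (line : String) :
    List (String × Bool) × List String × Bool :=
  let stripped := PySem.Str.strip line
  let e := if eeIsExp stripped then eeVal stripped else st.2.2
  let buffer := st.2.1 ++ [line]
  if PySem.Str.endswith stripped ";" then
    let cleaned := PySem.Str.strip (PySem.Str.join "\n" buffer)
    (if cleaned ≠ "" then st.1 ++ [(eeRstripSemi cleaned, e)] else st.1, [], false)
  else
    (st.1, buffer, e)

-- A's trailing 'if buffer:' block
def eeFinishA (st : List (String × Bool) × List String × Bool) : List (String × Bool) :=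
  if st.2.1 ≠ [] then
    let cleaned := PySem.Str.strip (PySem.Str.join "\n" st.2.1)
    if cleaned ≠ "" then st.1 ++ [(cleaned, st.2.2)] else st.1
  else st.1

def extract_expectations (sql : String) : List (String × Bool) :=
  eeFinishA ((PySem.Str.splitlines sql).foldl eeStepA ([], [], false))

-- ===== PORT B =====
-- B helper _chunk_flag: last expectation comment in the chunk decides, default False
def eeChunkFlag (chunk : List String) : Bool :=
  match chunk.reverse.find? (fun l => eeIsExp (PySem.Str.strip l)) with
  | some l => eeVal (PySem.Str.strip l)
  | none => false

-- pass 1 body: state = (chunks, cur)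
def eeStepB (st : List (List String) × List String) (line : String) :
    List (List String) × List String :=
  let cur := st.2 ++ [line]
  if PySem.Str.endswith (PySem.Str.strip line) ";" then (st.1 ++ [cur], []) else (st.1, cur)

-- pass 2 body: one flushed chunk → optional statement
def eeEmit (chunk : List String) : Option (String × Bool) :=
  let cleaned := PySem.Str.strip (PySem.Str.join "\n" chunk)
  if cleaned ≠ "" then some (eeRstripSemi cleaned, eeChunkFlag chunk) else none

def extract_expectations_alt (sql : String) : List (String × Bool) :=
  let st := (PySem.Str.splitlines sql).foldl eeStepB ([], [])
  let out := st.1.filterMap eeEmit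
  let tail := PySem.Str.strip (PySem.Str.join "\n" st.2)
  if tail ≠ "" then out ++ [(tail, eeChunkFlag st.2)] else out

-- ===== PRECONDITION & SPEC =====
def Spec_extract_expectations (sql : String) (out : List (String × Bool)) : Prop := out = extract_expectations_alt sql
instance (sql : String) (out : List (String × Bool)) : Decidable (Spec_extract_expectations sql out) := by unfold Spec_extract_expectations; infer_instance

-- ===== CLAIM (what is proved, stated in full; the proofs are below) =====
def Claim_equal_extract_expectations : Prop := ∀ (sql : String), Dom_extract_expectations sql → Spec_extract_expectations sql (extract_expectations sql)

-- ===== LEMMAS AND PROOFS =====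

theorem eeChunkFlag_snoc (xs : List String) (x : String) :
    eeChunkFlag (xs ++ [x]) =
      if eeIsExp (PySem.Str.strip x) then eeVal (PySem.Str.strip x) else eeChunkFlag xs := by
  unfold eeChunkFlag
  rw [List.reverse_append]
  simp only [List.reverse_singleton, List.singleton_append, List.find?]
  by_cases h : eeIsExp (PySem.Str.strip x)
  · simp [h]
  · simp [h]

theorem eeStepB_acc (lines : List String) :
    ∀ (cs : List (List String)) (buf : List String),
      lines.foldl eeStepB (cs, buf) =
        (cs ++ (lines.foldl eeStepB ([], buf)).1, (lines.foldl eeStepB ([], buf)).2) := by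
  induction lines with
  | nil => intro cs buf; simp
  | cons l ls ih =>
    intro cs buf
    simp only [List.foldl_cons]
    by_cases h : PySem.Str.endswith (PySem.Str.strip l) ";"
    · rw [show eeStepB (cs, buf) l = (cs ++ [buf ++ [l]], []) by
          simp only [eeStepB, h, if_true],
        show eeStepB (([], buf) : List (List String) × List String) l = ([buf ++ [l]], []) by
          simp only [eeStepB, h, if_true, List.nil_append],
        ih (cs ++ [buf ++ [l]]) [], ih [buf ++ [l]] []]
      simp
    · rw [show eeStepB (cs, buf) l = (cs, buf ++ [l]) by
          simp only [eeStepB]; rw [if_neg h],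
        show eeStepB (([], buf) : List (List String) × List String) l = ([], buf ++ [l]) by
          simp only [eeStepB]; rw [if_neg h]]
      exact ih cs (buf ++ [l])

-- tail-emission of A equals B's tail block (also when the buffer is empty)
theorem eeFinishA_eq (acc : List (String × Bool)) (buf : List String) :
    eeFinishA (acc, buf, eeChunkFlag buf) =
      acc ++ (if PySem.Str.strip (PySem.Str.join "\n" buf) ≠ "" then
        [(PySem.Str.strip (PySem.Str.join "\n" buf), eeChunkFlag buf)] else []) := by
  unfold eeFinishA
  rcases buf with _ | ⟨b, bs⟩
  · simp
    decide
  · by_cases h : PySem.Str.strip (PySem.Str.join "\n" (b :: bs)) ≠ ""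
    · simp [h]
    · simp at h; simp [h]

set_option maxHeartbeats 1000000 in
theorem ee_main (lines : List String) :
    ∀ (buf : List String) (acc : List (String × Bool)),
      eeFinishA (lines.foldl eeStepA (acc, buf, eeChunkFlag buf)) =
        acc ++ ((lines.foldl eeStepB ([], buf)).1.filterMap eeEmit ++
          (if PySem.Str.strip (PySem.Str.join "\n" (lines.foldl eeStepB ([], buf)).2) ≠ "" then
            [(PySem.Str.strip (PySem.Str.join "\n" (lines.foldl eeStepB ([], buf)).2),
              eeChunkFlag (lines.foldl eeStepB ([], buf)).2)] else [])) := by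
  induction lines with
  | nil => intro buf acc; simpa using eeFinishA_eq acc buf
  | cons l ls ih =>
    intro buf acc
    simp only [List.foldl_cons]
    by_cases h : PySem.Str.endswith (PySem.Str.strip l) ";"
    · have hstep : eeStepA (acc, buf, eeChunkFlag buf) l =
        (acc ++ (eeEmit (buf ++ [l])).toList, [], false) := by
        unfold eeStepA eeEmit
        simp only [h, if_true, eeChunkFlag_snoc]
        by_cases hc : PySem.Str.strip (PySem.Str.join "\n" (buf ++ [l])) = ""
        · simp only [hc]; simp
        · simp only [ne_eq, hc, not_false_iff, if_true, Option.toList_some]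
      have hstepb : eeStepB (([], buf) : List (List String) × List String) l =
          ([buf ++ [l]], []) := by simp only [eeStepB, h, if_true, List.nil_append]
      rw [hstep, hstepb, eeStepB_acc ls [buf ++ [l]] []]
      rw [show (false : Bool) = eeChunkFlag [] from rfl, ih [] (acc ++ (eeEmit (buf ++ [l])).toList)]
      simp only [List.singleton_append, List.append_assoc, List.filterMap_cons]
      rcases hE : eeEmit (buf ++ [l]) with _ | p <;> simp
    · have hstep : eeStepA (acc, buf, eeChunkFlag buf) l =
        (acc, buf ++ [l], eeChunkFlag (buf ++ [l])) := by
        unfold eeStepA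
        simp only [eeChunkFlag_snoc]
        rw [if_neg h]
      have hstepb : eeStepB (([], buf) : List (List String) × List String) l =
          ([], buf ++ [l]) := by simp only [eeStepB]; rw [if_neg h]
      rw [hstep, hstepb]
      exact ih (buf ++ [l]) acc

-- ===== VERDICT (by name: the statement is the Claim_ definition above) =====
set_option maxHeartbeats 1000000 in
theorem extract_expectations_spec : Claim_equal_extract_expectations := by
  intro sql _
  unfold Spec_extract_expectations extract_expectations extract_expectations_alt
  rw [show (false : Bool) = eeChunkFlag [] from rfl]
  refine (ee_main (PySem.Str.splitlines sql) [] []).trans ?_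
  rw [List.nil_append]
  by_cases ht : PySem.Str.strip
      (PySem.Str.join "\n" (List.foldl eeStepB ([], []) (PySem.Str.splitlines sql)).2) = ""
  · simp only [ne_eq, ht, not_true_eq_false, if_false, List.append_nil]
  · simp only [ne_eq, ht, not_false_eq_true, if_true]
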